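-- pv_equiv track=rewrite | github.com/ValyrianTech/ValyrianGamesLeaderboard | scripts/import_tournament_results.py | calculate_ranks_from_scores
-- ===== SOURCE A (Python) =====
-- from typing import List, Dict, Tuple, Optional, Any
--
-- def calculate_ranks_from_scores(final_scores: Dict[str, int]) -> Dict[str, int]:
--     """Convert final scores to ranks (0=best, 1=second, etc.), handling ties properly."""
--     # Sort participants by score (descending)
--     sorted_participants = sorted(final_scores.items(), key=lambda x: x[1], reverse=True)
--
--     ranks = {}
--     current_rank = 0
--
--     for i, (participant, score) in enumerate(sorted_participants):
--         if i > 0 and score < sorted_participants[i-1][1]: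
--             # Score is different from previous, update rank
--             current_rank = i
--
--         ranks[participant] = current_rank
--
--     return ranks
-- ===== SOURCE B (Python) =====
-- def calculate_ranks_from_scores(final_scores):
--     """Convert final scores to ranks (0=best, 1=second, etc.), handling ties properly.
--
--     Rank of a participant = number of participants with a strictly greater score;
--     no running rank state, no look-back at the previous sorted entry."""
--     scores = list(final_scores.values())
--     return {
--         participant: sum(1 for other in scores if other > score)
--         for participant, score in sorted(final_scores.items(), key=lambda x: x[1], reverse=True)
--     }
-- ===== Notes on version B (the rewrite author's own statement) =====
-- stated objective: alternative
-- what changed: Rank is computed directly as the count of strictly greater scores (a dict comprehension with a nested count) instead of a stateful single pass that tracks the current rank and compares each sorted entry with its predecessor.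
import Mathlib
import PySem

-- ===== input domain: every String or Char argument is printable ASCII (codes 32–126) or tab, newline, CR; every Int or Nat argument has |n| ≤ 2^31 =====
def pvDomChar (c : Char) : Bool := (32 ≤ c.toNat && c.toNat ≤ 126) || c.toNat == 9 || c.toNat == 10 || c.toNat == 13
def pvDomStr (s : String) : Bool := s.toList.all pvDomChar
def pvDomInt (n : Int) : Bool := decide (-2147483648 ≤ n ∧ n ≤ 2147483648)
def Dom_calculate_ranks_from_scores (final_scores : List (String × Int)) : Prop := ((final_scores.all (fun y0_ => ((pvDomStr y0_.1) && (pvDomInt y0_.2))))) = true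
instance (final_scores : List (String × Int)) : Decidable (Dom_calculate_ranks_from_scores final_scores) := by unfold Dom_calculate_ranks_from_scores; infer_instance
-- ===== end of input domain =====

-- B computes each rank directly as the count of strictly greater scores (dict comprehension with a
-- nested count) instead of A's stateful pass that tracks the current rank via the previous sorted entry.

-- ===== PORT A =====
-- loop body of A's 'for i, (participant, score) in enumerate(sorted_participants)'
def pvAStep (sp : List (String × Int)) (st : PySem.Dict String Int × Int)
    (ix : Int × (String × Int)) : PySem.Dict String Int × Int :=
  let i := ix.1
  let participant := ix.2.1
  let score := ix.2.2
  let current_rank :=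
    if i > 0 ∧ score < (PySem.List.pyGetD sp (i - 1) ("", 0)).2 then i else st.2
  (st.1.insert participant current_rank, current_rank)

def calculate_ranks_from_scores (final_scores : List (String × Int)) : List (String × Int) :=
  let sorted_participants := PySem.List.sorted final_scores (fun x => x.2) true
  (((PySem.List.enumerate sorted_participants).foldl (pvAStep sorted_participants)
      ((PySem.Dict.empty : PySem.Dict String Int), 0)).1).items

-- ===== PORT B =====
def calculate_ranks_from_scores_alt (final_scores : List (String × Int)) : List (String × Int) :=
  let scores := final_scores.map (fun p => p.2)
  (((PySem.List.sorted final_scores (fun x => x.2) true).foldl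
      (fun (d : PySem.Dict String Int) p =>
        d.insert p.1 (scores.foldl (fun acc other => if p.2 < other then acc + 1 else acc) 0))
      (PySem.Dict.empty : PySem.Dict String Int)).items)

-- ===== PRECONDITION & SPEC =====
def Spec_calculate_ranks_from_scores (final_scores : List (String × Int)) (out : List (String × Int)) : Prop := out = calculate_ranks_from_scores_alt final_scores
instance (final_scores : List (String × Int)) (out : List (String × Int)) : Decidable (Spec_calculate_ranks_from_scores final_scores out) := by unfold Spec_calculate_ranks_from_scores; infer_instance

-- ===== CLAIM (what is proved, stated in full; the proofs are below) =====
def Claim_equal_calculate_ranks_from_scores : Prop := ∀ (final_scores : List (String × Int)), Dom_calculate_ranks_from_scores final_scores → Spec_calculate_ranks_from_scores final_scores (calculate_ranks_from_scores final_scores)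

-- ===== LEMMAS AND PROOFS =====

-- number of entries of F whose score is strictly greater than s
def pvGCount (F : List (String × Int)) (s : Int) : Int :=
  (F.countP (fun q => decide (s < q.2)) : Int)

lemma pv_countP_eq (F : List (String × Int)) (s : Int) (k : Nat) (hk : k ≤ F.length)
    (h1 : ∀ i : Nat, i < k → s < (F.getD i ("", 0)).2)
    (h2 : ∀ i : Nat, k ≤ i → i < F.length → (F.getD i ("", 0)).2 ≤ s) :
    F.countP (fun q => decide (s < q.2)) = k := by
  have ht : (F.take k).countP (fun q => decide (s < q.2)) = (F.take k).length := by
    refine List.countP_eq_length.mpr ?_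
    intro a ha
    obtain ⟨i, hi, rfl⟩ := List.mem_iff_getElem.mp ha
    have hik : i < k := by simp at hi; omega
    rw [List.getElem_take]
    have := h1 i hik
    rw [List.getD_eq_getElem _ _ (by simp at hi; omega)] at this
    exact decide_eq_true this
  have hd : (F.drop k).countP (fun q => decide (s < q.2)) = 0 := by
    refine List.countP_eq_zero.mpr ?_
    intro a ha
    obtain ⟨i, hi, rfl⟩ := List.mem_iff_getElem.mp ha
    rw [List.getElem_drop]
    simp only [decide_eq_true_eq]
    have := h2 (k + i) (Nat.le_add_right k i) (by simp at hi; omega)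
    rw [List.getD_eq_getElem _ _ (by simp at hi; omega)] at this
    omega
  calc F.countP (fun q => decide (s < q.2))
      = (F.take k ++ F.drop k).countP (fun q => decide (s < q.2)) := by
        rw [List.take_append_drop]
    _ = k := by rw [List.countP_append, ht, hd, List.length_take_of_le hk]; omega

lemma pv_aloop (F : List (String × Int))
    (hmono : ∀ i j : Nat, i ≤ j → j < F.length →
      (F.getD j ("", 0)).2 ≤ (F.getD i ("", 0)).2) :
    ∀ (rest pre : List (String × Int)) (d : PySem.Dict String Int) (cr : Int),
      F = pre ++ rest →
      cr = (if pre.length = 0 then 0 else pvGCount F (F.getD (pre.length - 1) ("", 0)).2) →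
      ((PySem.List.enumerate rest (pre.length : Int)).foldl (pvAStep F) (d, cr)).1
        = rest.foldl (fun d p => d.insert p.1 (pvGCount F p.2)) d := by
  intro rest
  induction rest with
  | nil => intro pre d cr hF hcr; simp [PySem.List.enumerate]
  | cons x rest ih =>
    intro pre d cr hF hcr
    have hklen : pre.length < F.length := by rw [hF]; simp
    have hFk : F.getD pre.length ("", 0) = x := by
      rw [hF, List.getD_eq_getElem _ _ (by simp),
        List.getElem_append_right (Nat.le_refl _)]
      simp
    -- the new current_rank equals the strictly-greater count of x's score
    have hcrval :
        (if ((pre.length : Int) > 0 ∧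
              x.2 < (PySem.List.pyGetD F ((pre.length : Int) - 1) ("", 0)).2)
          then ((pre.length : Int)) else cr) = pvGCount F x.2 := by
      rcases Nat.eq_zero_or_pos pre.length with h0 | hpos
      · rw [if_neg (by simp [h0]), hcr, if_pos h0]
        have : F.countP (fun q => decide (x.2 < q.2)) = 0 := by
          refine pv_countP_eq F x.2 0 (Nat.zero_le _) (by omega) ?_
          intro i _ hi
          have := hmono 0 i (Nat.zero_le i) hi
          rw [← h0, hFk] at this
          exact this
        simp [pvGCount, this]
      · have hk1 : pre.length - 1 < F.length := by omega
        have hprev : PySem.List.pyGetD F ((pre.length : Int) - 1) ("", 0)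
            = F.getD (pre.length - 1) ("", 0) := by
          rw [show ((pre.length : Int) - 1) = ((pre.length - 1 : Nat) : Int) by omega,
            PySem.List.pyGetD_natCast]
        have hle : x.2 ≤ (F.getD (pre.length - 1) ("", 0)).2 := by
          have := hmono (pre.length - 1) pre.length (by omega) hklen
          rw [hFk] at this; exact this
        by_cases hlt : x.2 < (F.getD (pre.length - 1) ("", 0)).2
        · rw [if_pos ⟨by exact_mod_cast hpos, by rw [hprev]; exact hlt⟩]
          have : F.countP (fun q => decide (x.2 < q.2)) = pre.length := by
            refine pv_countP_eq F x.2 pre.length (Nat.le_of_lt hklen) ?_ ?_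
            · intro i hik
              have h1 := hmono i (pre.length - 1) (by omega) hk1
              exact lt_of_lt_of_le hlt h1
            · intro i hki hi
              have := hmono pre.length i hki hi
              rw [hFk] at this; exact this
          simp [pvGCount, this]
        · rw [if_neg (by rw [hprev]; tauto), hcr, if_neg (by omega)]
          have hx2 : (F.getD (pre.length - 1) ("", 0)).2 = x.2 := by omega
          rw [hx2]
    rw [PySem.List.enumerate_cons, List.foldl_cons, List.foldl_cons,
      show pvAStep F (d, cr) ((pre.length : Int), x)
        = (d.insert x.1 (pvGCount F x.2), pvGCount F x.2) by
          simp only [pvAStep]; rw [hcrval],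
      show ((pre.length : Int) + 1) = (((pre ++ [x]).length : Nat) : Int) by simp]
    refine ih (pre ++ [x]) _ _ (by simpa using hF) ?_
    rw [if_neg (by simp)]
    have : (pre ++ [x]).length - 1 = pre.length := by simp
    rw [this, hFk]

-- ===== VERDICT (by name: the statement is the Claim_ definition above) =====
theorem calculate_ranks_from_scores_spec : Claim_equal_calculate_ranks_from_scores := by
  intro fs _
  unfold Spec_calculate_ranks_from_scores
  unfold calculate_ranks_from_scores calculate_ranks_from_scores_alt
  simp only []
  have hmono : ∀ i j : Nat, i ≤ j →
      j < (PySem.List.sorted fs (fun x => x.2) true).length →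
      ((PySem.List.sorted fs (fun x => x.2) true).getD j ("", 0)).2 ≤
        ((PySem.List.sorted fs (fun x => x.2) true).getD i ("", 0)).2 := by
    have hp := PySem.List.sorted_pairwise_rev (xs := fs) (key := fun x => x.2)
    rw [List.pairwise_iff_getElem] at hp
    intro i j hij hj
    rw [List.getD_eq_getElem _ _ hj, List.getD_eq_getElem _ _ (Nat.lt_of_le_of_lt hij hj)]
    rcases Nat.lt_or_eq_of_le hij with h | h
    · exact hp i j _ hj h
    · subst h; exact le_refl _
  have hA := pv_aloop (PySem.List.sorted fs (fun x => x.2) true) hmono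
    (PySem.List.sorted fs (fun x => x.2) true) [] PySem.Dict.empty 0 rfl (by simp)
  simp only [List.length_nil, Nat.cast_zero] at hA
  rw [hA]
  congr 1
  apply PySem.List.foldl_congr_mem
  intro acc p _
  congr 1
  rw [PySem.List.foldl_ite_add_one (p := fun other => p.2 < other)]
  have hperm : (PySem.List.sorted fs (fun x => x.2) true).Perm fs :=
    PySem.List.sorted_perm ..
  simp only [pvGCount, List.countP_map, hperm.countP_eq, zero_add]
  rfl
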